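-- pv_equiv track=rewrite | github.com/3LENDERMAN/Python_projects | 04/doctor.py | patient_reports
-- ===== SOURCE A (Python) =====
-- Patient = tuple[int, list[tuple[int, int, int, int]]]
--
-- def patient_reports(patients: list[Patient]) -> list[tuple[int, bool, bool, bool]]:
--     reports = []
--     for patient in patients:
--         sys = 0
--         sys_p = True
--         dia = 0
--         dia_p = True
--         pulse = 0
--         pul_p = True
--         ico, visits = patient
--         for visit in visits:
--             _, p, s, d = visit
--             if s > sys: sys = s
--             else: sys_p = False
--             if d > dia: dia = d
--             else: dia_p = False
--             if p > pulse: pulse = p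
--             else: pul_p = False
--         report = (pulse, pul_p, sys_p, dia_p)
--         reports.append(report)
--     return reports
-- ===== SOURCE B (Python) =====
-- def _inc(col):
--     return all(b > a for a, b in zip([0] + col, col))
--
-- def patient_reports(patients):
--     reports = []
--     for ico, visits in patients:
--         pulses = [v[1] for v in visits]
--         systs = [v[2] for v in visits]
--         dias = [v[3] for v in visits]
--         reports.append((max([0] + pulses), _inc(pulses), _inc(systs), _inc(dias)))
--     return reports
-- ===== Notes on version B (the rewrite author's own statement) =====
-- stated objective: simpler
-- what changed: Replaces A's fused six-variable running-max loop per patient by three independent column extractions, computing the max with max([0]+col) and each strictly-increasing flag with all(b > a) over zip([0]+col, col).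
import Mathlib
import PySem

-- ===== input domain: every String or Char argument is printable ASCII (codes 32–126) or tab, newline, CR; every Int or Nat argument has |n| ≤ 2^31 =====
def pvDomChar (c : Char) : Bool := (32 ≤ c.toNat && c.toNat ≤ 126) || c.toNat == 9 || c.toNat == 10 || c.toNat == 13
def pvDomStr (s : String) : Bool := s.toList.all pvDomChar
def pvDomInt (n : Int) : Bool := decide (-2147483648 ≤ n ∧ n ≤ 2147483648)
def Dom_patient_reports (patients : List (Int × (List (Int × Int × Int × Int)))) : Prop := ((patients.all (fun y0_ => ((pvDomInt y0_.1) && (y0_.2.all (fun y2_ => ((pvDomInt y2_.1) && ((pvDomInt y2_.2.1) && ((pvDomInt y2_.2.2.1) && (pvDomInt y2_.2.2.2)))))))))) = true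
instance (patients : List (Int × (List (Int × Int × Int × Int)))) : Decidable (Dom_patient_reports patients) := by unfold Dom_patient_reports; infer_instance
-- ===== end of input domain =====

-- B replaces A's fused six-variable running-max loop per patient by three independent
-- column-wise passes (max with a 0 sentinel; strictly-increasing flag via zip); objective: simpler.

-- ===== PORT A =====
-- the inner 'for visit in visits' loop of A, state (sys, sys_p, dia, dia_p, pulse, pul_p)
def pvStepA (st : Int × Bool × Int × Bool × Int × Bool) (visit : Int × Int × Int × Int) :
    Int × Bool × Int × Bool × Int × Bool :=
  let (sys, sys_p, dia, dia_p, pulse, pul_p) := st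
  let p := visit.2.1
  let s := visit.2.2.1
  let d := visit.2.2.2
  let sys' := if s > sys then s else sys
  let sys_p' := if s > sys then sys_p else false
  let dia' := if d > dia then d else dia
  let dia_p' := if d > dia then dia_p else false
  let pulse' := if p > pulse then p else pulse
  let pul_p' := if p > pulse then pul_p else false
  (sys', sys_p', dia', dia_p', pulse', pul_p')

def patient_reports (patients : List (Int × (List (Int × Int × Int × Int)))) : List (Int × Bool × Bool × Bool) :=
  patients.foldl
    (fun reports patient =>
      let visits := patient.2
      let st := visits.foldl pvStepA (0, true, 0, true, 0, true)
      let (_, sys_p, _, dia_p, pulse, pul_p) := st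
      reports ++ [(pulse, pul_p, sys_p, dia_p)])
    []

-- ===== PORT B =====
-- all(b > a for a, b in zip([0] + col, col))
def pvInc (col : List Int) : Bool := ((0 :: col).zip col).all (fun q => q.2 > q.1)

def patient_reports_alt (patients : List (Int × (List (Int × Int × Int × Int)))) : List (Int × Bool × Bool × Bool) :=
  patients.map (fun patient =>
    let visits := patient.2
    let pulses := visits.map (fun v => v.2.1)
    let systs := visits.map (fun v => v.2.2.1)
    let dias := visits.map (fun v => v.2.2.2)
    ((PySem.List.max? (0 :: pulses) (fun y => y)).getD 0, pvInc pulses, pvInc systs, pvInc dias))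

-- ===== PRECONDITION & SPEC =====
def Spec_patient_reports (patients : List (Int × (List (Int × Int × Int × Int)))) (out : List (Int × Bool × Bool × Bool)) : Prop := out = patient_reports_alt patients
instance (patients : List (Int × (List (Int × Int × Int × Int)))) (out : List (Int × Bool × Bool × Bool)) : Decidable (Spec_patient_reports patients out) := by unfold Spec_patient_reports; infer_instance

-- ===== CLAIM (what is proved, stated in full; the proofs are below) =====
def Claim_equal_patient_reports : Prop := ∀ (patients : List (Int × (List (Int × Int × Int × Int)))), Dom_patient_reports patients → Spec_patient_reports patients (patient_reports patients)

-- ===== LEMMAS AND PROOFS =====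

-- 'strictly increasing from a, tracking the running max' — the flag A's loop maintains
def pvChainM (a : Int) : List Int → Bool
  | [] => true
  | x :: xs => (decide (a < x)) && pvChainM (max a x) xs

-- consecutive strict increase from a — the flag B computes
def pvChain (a : Int) : List Int → Bool
  | [] => true
  | x :: xs => (decide (a < x)) && pvChain x xs

theorem pvChainM_eq_chain : ∀ (xs : List Int) (a : Int), pvChainM a xs = pvChain a xs := by
  intro xs
  induction xs with
  | nil => intro a; rfl
  | cons x xs ih =>
    intro a
    by_cases h : a < x
    · simp [pvChainM, pvChain, h, max_eq_right h.le, ih]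
    · simp [pvChainM, pvChain, h]

theorem pvInc_eq_chain : ∀ (xs : List Int) (a : Int),
    ((a :: xs).zip xs).all (fun q => q.2 > q.1) = pvChain a xs := by
  intro xs
  induction xs with
  | nil => intro a; rfl
  | cons x xs ih =>
    intro a
    simp [pvChain, ← ih x, GT.gt]

theorem pvInner_eq : ∀ (visits : List (Int × Int × Int × Int)) (sys dia pulse : Int) (sp dp pp : Bool),
    visits.foldl pvStepA (sys, sp, dia, dp, pulse, pp) =
      ((visits.map (fun v => v.2.2.1)).foldl max sys,
       sp && pvChainM sys (visits.map (fun v => v.2.2.1)),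
       (visits.map (fun v => v.2.2.2)).foldl max dia,
       dp && pvChainM dia (visits.map (fun v => v.2.2.2)),
       (visits.map (fun v => v.2.1)).foldl max pulse,
       pp && pvChainM pulse (visits.map (fun v => v.2.1))) := by
  intro visits
  induction visits with
  | nil => intro sys dia pulse sp dp pp; simp [pvChainM]
  | cons v visits ih =>
    intro sys dia pulse sp dp pp
    obtain ⟨i, p, s, d⟩ := v
    simp only [List.foldl_cons, List.map_cons, pvStepA, pvChainM, ih]
    by_cases hs : s > sys <;> by_cases hd : d > dia <;> by_cases hp : p > pulse <;>
      simp [hs, hd, hp, le_of_lt, not_lt.mp]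

theorem pvAppend_foldl (g : (Int × (List (Int × Int × Int × Int))) → Int × Bool × Bool × Bool) :
    ∀ (xs : List (Int × (List (Int × Int × Int × Int)))) (acc : List (Int × Bool × Bool × Bool)),
      xs.foldl (fun a x => a ++ [g x]) acc = acc ++ xs.map g := by
  intro xs
  induction xs with
  | nil => intro acc; simp
  | cons x xs ih => intro acc; simp [ih]

-- ===== VERDICT (by name: the statement is the Claim_ definition above) =====
theorem patient_reports_spec : Claim_equal_patient_reports := by
  intro patients _
  show patient_reports patients = patient_reports_alt patients
  unfold patient_reports patient_reports_alt
  rw [pvAppend_foldl (g := fun patient =>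
    let visits := patient.2
    let st := visits.foldl pvStepA (0, true, 0, true, 0, true)
    let (_, sys_p, _, dia_p, pulse, pul_p) := st
    (pulse, pul_p, sys_p, dia_p))]
  simp only [List.nil_append]
  apply List.map_congr_left
  intro patient _
  simp [pvInner_eq, pvInc, pvInc_eq_chain, pvChainM_eq_chain,
    PySem.List.max?_id_cons]
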